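-- pv_equiv track=rewrite | github.com/rxpelle/etsy-scout | etsy_scout/collectors/ads_importer.py | _looks_like_header
-- ===== SOURCE A (Python) =====
-- COLUMN_ALIASES = {
--     'listing_title': [
--         'listing title', 'listing', 'title', 'listing name',
--     ],
--     'search_term': [
--         'search query', 'search term', 'query', 'customer search term',
--         'keyword', 'search terms',
--     ],
--     'impressions': ['impressions', 'impr', 'impr.'],
--     'clicks': ['clicks', 'click'],
--     'ctr': [
--         'click-through rate', 'ctr', 'click thru rate',
--         'click-thru rate', 'click through rate',
--     ],
--     'spend': ['spend', 'cost', 'total spend', 'budget spent', 'ad spend'],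
--     'revenue': [
--         'revenue', 'total revenue', 'sales', 'order revenue',
--         'total sales',
--     ],
--     'orders': [
--         'orders', 'total orders', 'conversions',
--     ],
--     'roas': [
--         'roas', 'return on ad spend', 'return on spend',
--     ],
-- }
--
-- def _looks_like_header(columns_lower):
--     known_terms = set()
--     for canonical, aliases in COLUMN_ALIASES.items():
--         for alias in aliases:
--             if alias in columns_lower:
--                 known_terms.add(canonical)
--                 break
--     return len(known_terms) >= 3
-- ===== SOURCE B (Python) =====
-- COLUMN_ALIASES = {
--     'listing_title': [
--         'listing title', 'listing', 'title', 'listing name',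
--     ],
--     'search_term': [
--         'search query', 'search term', 'query', 'customer search term',
--         'keyword', 'search terms',
--     ],
--     'impressions': ['impressions', 'impr', 'impr.'],
--     'clicks': ['clicks', 'click'],
--     'ctr': [
--         'click-through rate', 'ctr', 'click thru rate',
--         'click-thru rate', 'click through rate',
--     ],
--     'spend': ['spend', 'cost', 'total spend', 'budget spent', 'ad spend'],
--     'revenue': [
--         'revenue', 'total revenue', 'sales', 'order revenue',
--         'total sales',
--     ],
--     'orders': [
--         'orders', 'total orders', 'conversions',
--     ],
--     'roas': [
--         'roas', 'return on ad spend', 'return on spend',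
--     ],
-- }
--
-- _ALIAS_TO_CANONICAL = {}
-- for _canonical, _aliases in COLUMN_ALIASES.items():
--     for _alias in _aliases:
--         _ALIAS_TO_CANONICAL[_alias] = _canonical
--
--
-- def _looks_like_header(columns_lower):
--     found = {
--         _ALIAS_TO_CANONICAL[col]
--         for col in columns_lower
--         if col in _ALIAS_TO_CANONICAL
--     }
--     return len(found) >= 3
-- ===== Notes on version B (the rewrite author's own statement) =====
-- stated objective: idiomatic
-- what changed: Replaces the per-canonical scan of the alias table (each of the 37 aliases membership-tested against the column list) with a flat alias-to-canonical reverse dict built once; the function iterates the input columns, looks each up in the dict, and counts the distinct canonicals found.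
import Mathlib
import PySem

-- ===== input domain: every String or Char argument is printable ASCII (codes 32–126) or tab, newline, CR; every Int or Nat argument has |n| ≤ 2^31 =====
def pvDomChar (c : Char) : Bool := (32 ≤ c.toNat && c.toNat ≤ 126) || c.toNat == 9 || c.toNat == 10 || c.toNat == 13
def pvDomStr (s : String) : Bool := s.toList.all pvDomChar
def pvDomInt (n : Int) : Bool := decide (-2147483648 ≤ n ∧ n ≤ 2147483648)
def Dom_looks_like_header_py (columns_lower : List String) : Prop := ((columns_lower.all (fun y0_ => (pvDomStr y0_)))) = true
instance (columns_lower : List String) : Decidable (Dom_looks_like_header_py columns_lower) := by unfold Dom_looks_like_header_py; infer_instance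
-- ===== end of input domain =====

-- B replaces A's per-canonical scan of the alias table with a flat alias→canonical reverse
-- dict built once, driving the computation by the input columns (idiomatic, same cost class).


-- ===== PORT A =====
-- COLUMN_ALIASES as an insertion-ordered association list (dict of str -> list str)
def pvColumnAliases : List (String × List String) :=
  [("listing_title", ["listing title", "listing", "title", "listing name"]),
   ("search_term", ["search query", "search term", "query", "customer search term",
                    "keyword", "search terms"]),
   ("impressions", ["impressions", "impr", "impr."]),
   ("clicks", ["clicks", "click"]),
   ("ctr", ["click-through rate", "ctr", "click thru rate",
            "click-thru rate", "click through rate"]),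
   ("spend", ["spend", "cost", "total spend", "budget spent", "ad spend"]),
   ("revenue", ["revenue", "total revenue", "sales", "order revenue", "total sales"]),
   ("orders", ["orders", "total orders", "conversions"]),
   ("roas", ["roas", "return on ad spend", "return on spend"])]

-- inner 'for alias in aliases: if alias in columns_lower: known_terms.add(canonical); break'
def pvAInner (cols : List String) (s : PySem.Set String) (canonical : String) :
    List String → PySem.Set String
  | [] => s
  | a :: rest => if a ∈ cols then PySem.Set.add s canonical else pvAInner cols s canonical rest

def looks_like_header_py (columns_lower : List String) : Bool :=
  let known_terms : PySem.Set String :=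
    pvColumnAliases.foldl (fun s p => pvAInner columns_lower s p.1 p.2) PySem.Set.empty
  decide (3 ≤ PySem.Set.len known_terms)

-- ===== PORT B =====
-- the module-level reverse map: for canonical, aliases in COLUMN_ALIASES: for alias: d[alias]=canonical
def pvAliasToCanonical : PySem.Dict String String :=
  pvColumnAliases.foldl
    (fun d p => p.2.foldl (fun d a => d.insert a p.1) d) PySem.Dict.empty

def looks_like_header_py_alt (columns_lower : List String) : Bool :=
  let found : PySem.Set String :=
    columns_lower.foldl
      (fun s col =>
        match pvAliasToCanonical.get? col with
        | some c => PySem.Set.add s c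
        | none => s) PySem.Set.empty
  decide (3 ≤ PySem.Set.len found)

-- ===== PRECONDITION & SPEC =====
def Spec_looks_like_header_py (columns_lower : List String) (out : Bool) : Prop := out = looks_like_header_py_alt columns_lower
instance (columns_lower : List String) (out : Bool) : Decidable (Spec_looks_like_header_py columns_lower out) := by unfold Spec_looks_like_header_py; infer_instance

-- ===== CLAIM (what is proved, stated in full; the proofs are below) =====
def Claim_equal_looks_like_header_py : Prop := ∀ (columns_lower : List String), Dom_looks_like_header_py columns_lower → Spec_looks_like_header_py columns_lower (looks_like_header_py columns_lower)

-- ===== LEMMAS AND PROOFS =====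
set_option maxRecDepth 100000

-- the reverse map as a flat association list
def pvFlat : List (String × String) :=
  pvColumnAliases.flatMap (fun p => p.2.map (fun a => (a, p.1)))

set_option maxRecDepth 100000 in
theorem pvAliasToCanonical_eq : pvAliasToCanonical = PySem.Dict.mk pvFlat := by decide

set_option maxRecDepth 100000 in
theorem pvFlat_keys_nodup : (pvFlat.map Prod.fst).Nodup := by decide

-- first-match lookup in a key-nodup literal assoc list is membership
theorem pvGet?_mk_iff_mem (l : List (String × String)) (hn : (l.map Prod.fst).Nodup)
    (col c : String) : (PySem.Dict.mk l).get? col = some c ↔ (col, c) ∈ l := by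
  induction l with
  | nil => simp [PySem.Dict.get?]
  | cons p rest ih =>
    obtain ⟨k, v⟩ := p
    simp only [List.map_cons, List.nodup_cons] at hn
    rw [PySem.Dict.get?_mk_cons]
    by_cases h : k = col
    · subst h
      simp only [beq_self_eq_true, if_true, Option.some.injEq, List.mem_cons]
      constructor
      · rintro rfl; exact Or.inl rfl
      · rintro (h | h)
        · injection h with h1 h2; exact h2.symm
        · exact absurd (List.mem_map.mpr ⟨_, h, rfl⟩) hn.1
    · simp only [beq_iff_eq, h, if_false, ih hn.2, List.mem_cons]
      constructor
      · exact Or.inr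
      · rintro (he | he)
        · exact absurd (congrArg Prod.fst he).symm h
        · exact he

theorem pvMemFlat (col c : String) :
    (col, c) ∈ pvFlat ↔ ∃ p ∈ pvColumnAliases, p.1 = c ∧ col ∈ p.2 := by
  simp only [pvFlat, List.mem_flatMap, List.mem_map]
  constructor
  · rintro ⟨p, hp, a, ha, he⟩
    obtain ⟨rfl, rfl⟩ := Prod.mk.injEq _ _ _ _ ▸ he
    exact ⟨p, hp, rfl, ha⟩
  · rintro ⟨p, hp, rfl, ha⟩
    exact ⟨p, hp, col, ha, rfl⟩

-- membership in A's inner loop result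
theorem pvMem_aInner (cols : List String) (s : PySem.Set String) (k : String)
    (al : List String) (c : String) :
    c ∈ pvAInner cols s k al ↔ c ∈ s ∨ (c = k ∧ ∃ a ∈ al, a ∈ cols) := by
  induction al generalizing s with
  | nil => simp [pvAInner]
  | cons a rest ih =>
    simp only [pvAInner]
    by_cases h : a ∈ cols
    · simp only [h, if_true, PySem.Set.mem_add, List.exists_mem_cons_iff]
      tauto
    · simp only [h, if_false, ih, List.exists_mem_cons_iff]
      tauto

theorem pvNodup_aInner (cols : List String) (s : PySem.Set String) (k : String)
    (al : List String) (hs : s.Nodup) : (pvAInner cols s k al).Nodup := by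
  induction al generalizing s with
  | nil => exact hs
  | cons a rest ih =>
    simp only [pvAInner]
    by_cases h : a ∈ cols
    · simp only [h, if_true]; exact PySem.Set.nodup_add _ _ hs
    · simp only [h, if_false]; exact ih _ hs

-- membership in A's outer fold
theorem pvMem_afold (cols : List String) (t : List (String × List String))
    (s : PySem.Set String) (c : String) :
    c ∈ t.foldl (fun s p => pvAInner cols s p.1 p.2) s ↔
      c ∈ s ∨ ∃ p ∈ t, p.1 = c ∧ ∃ a ∈ p.2, a ∈ cols := by
  induction t generalizing s with
  | nil => simp
  | cons p rest ih =>
    simp only [List.foldl_cons, ih, pvMem_aInner, List.mem_cons]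
    constructor
    · rintro ((h | ⟨rfl, h⟩) | ⟨q, hq, h⟩)
      · exact Or.inl h
      · exact Or.inr ⟨p, Or.inl rfl, rfl, h⟩
      · exact Or.inr ⟨q, Or.inr hq, h⟩
    · rintro (h | ⟨q, hq | hq, h⟩)
      · exact Or.inl (Or.inl h)
      · subst hq; exact Or.inl (Or.inr ⟨h.1.symm, h.2⟩)
      · exact Or.inr ⟨q, hq, h⟩

theorem pvNodup_afold (cols : List String) (t : List (String × List String))
    (s : PySem.Set String) (hs : s.Nodup) :
    (t.foldl (fun s p => pvAInner cols s p.1 p.2) s).Nodup := by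
  induction t generalizing s with
  | nil => exact hs
  | cons p rest ih => exact ih _ (pvNodup_aInner _ _ _ _ hs)

-- membership in B's fold
theorem pvMem_bfold (cols : List String) (s : PySem.Set String) (c : String) :
    c ∈ cols.foldl
        (fun s col => match pvAliasToCanonical.get? col with
          | some k => PySem.Set.add s k | none => s) s ↔
      c ∈ s ∨ ∃ col ∈ cols, pvAliasToCanonical.get? col = some c := by
  induction cols generalizing s with
  | nil => simp
  | cons col rest ih =>
    simp only [List.foldl_cons]
    cases h : pvAliasToCanonical.get? col with
    | none =>
      simp only [ih, List.exists_mem_cons_iff, h, reduceCtorEq, false_or]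
    | some k =>
      simp only [ih, PySem.Set.mem_add, List.exists_mem_cons_iff, h,
        Option.some.injEq, eq_comm]
      tauto

theorem pvNodup_bfold (cols : List String) (s : PySem.Set String) (hs : s.Nodup) :
    (cols.foldl
        (fun s col => match pvAliasToCanonical.get? col with
          | some k => PySem.Set.add s k | none => s) s).Nodup := by
  induction cols generalizing s with
  | nil => exact hs
  | cons col rest ih =>
    simp only [List.foldl_cons]
    cases h : pvAliasToCanonical.get? col with
    | none => exact ih _ hs
    | some k => exact ih _ (PySem.Set.nodup_add _ _ hs)

-- ===== VERDICT (by name: the statement is the Claim_ definition above) =====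
theorem looks_like_header_py_spec : Claim_equal_looks_like_header_py := by
  intro cols _
  unfold Spec_looks_like_header_py looks_like_header_py looks_like_header_py_alt
  have hmem : ∀ c,
      c ∈ pvColumnAliases.foldl (fun s p => pvAInner cols s p.1 p.2) PySem.Set.empty ↔
      c ∈ cols.foldl
        (fun s col => match pvAliasToCanonical.get? col with
          | some k => PySem.Set.add s k | none => s) PySem.Set.empty := by
    intro c
    rw [pvMem_afold, pvMem_bfold]
    simp only [PySem.Set.empty, List.not_mem_nil, false_or]
    constructor
    · rintro ⟨p, hp, hc, a, ha, hacols⟩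
      refine ⟨a, hacols, ?_⟩
      rw [pvAliasToCanonical_eq]
      exact (pvGet?_mk_iff_mem pvFlat pvFlat_keys_nodup a c).mpr
        ((pvMemFlat a c).mpr ⟨p, hp, hc, ha⟩)
    · rintro ⟨col, hcol, hg⟩
      rw [pvAliasToCanonical_eq] at hg
      obtain ⟨p, hp, hc, ha⟩ := (pvMemFlat col c).mp
        ((pvGet?_mk_iff_mem pvFlat pvFlat_keys_nodup col c).mp hg)
      exact ⟨p, hp, hc, col, ha, hcol⟩
  have hperm :
      (pvColumnAliases.foldl (fun s p => pvAInner cols s p.1 p.2) PySem.Set.empty).Perm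
      (cols.foldl
        (fun s col => match pvAliasToCanonical.get? col with
          | some k => PySem.Set.add s k | none => s) PySem.Set.empty) :=
    (List.perm_ext_iff_of_nodup
      (pvNodup_afold cols _ _ (by simp [PySem.Set.empty]))
      (pvNodup_bfold cols _ (by simp [PySem.Set.empty]))).mpr hmem
  simp only [PySem.Set.len, hperm.length_eq]
  rfl
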